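-- pv_equiv track=rewrite | github.com/XyzHuy/-DL-Fine-tuning-coding-model | data/solution/Solution1258.py | generateSentences
-- ===== SOURCE A (Python) =====
-- from typing import List
-- from collections import defaultdict
--
-- def generateSentences(synonyms: List[List[str]], text: str) -> List[str]:
--     # Create a graph for synonyms
--     graph = defaultdict(set)
--     for word1, word2 in synonyms:
--         graph[word1].add(word2)
--         graph[word2].add(word1)
--
--     # Create a dictionary to store the set of synonyms for each word
--     synsets = defaultdict(set)
--
--     # Function to perform DFS and find all synonyms for a word
--     def dfs(word, synset):
--         if word in synset:
--             return
--         synset.add(word)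
--         for neighbor in graph[word]:
--             dfs(neighbor, synset)
--
--     # Populate the synsets dictionary
--     for word in graph:
--         if word not in synsets:
--             current_synset = set()
--             dfs(word, current_synset)
--             for syn in current_synset:
--                 synsets[syn] = current_synset
--
--     # Split the text into words
--     words = text.split()
--
--     # Generate all possible sentences
--     def backtrack(index, path):
--         if index == len(words):
--             result.append(' '.join(path))
--             return
--         word = words[index]
--         if word in synsets:
--             for synonym in sorted(synsets[word]):
--                 backtrack(index + 1, path + [synonym])
--         else:
--             backtrack(index + 1, path + [word])
--
--     result = []
--     backtrack(0, [])
--     return sorted(result)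
-- ===== SOURCE B (Python) =====
-- def generateSentences(synonyms, text):
--     # adjacency lists
--     adj = {}
--     for pair in synonyms:
--         a, b = pair
--         adj.setdefault(a, []).append(b)
--         adj.setdefault(b, []).append(a)
--     # connected components via an explicit stack (iterative, no recursion)
--     classes = {}
--     for start in adj:
--         if start in classes:
--             continue
--         seen = set()
--         stack = [start]
--         while stack:
--             u = stack.pop()
--             if u not in seen:
--                 seen.add(u)
--                 stack.extend(adj[u])
--         members = sorted(seen)
--         for u in members:
--             classes[u] = members
--     # iterative cartesian product over per-word choice lists
--     sentences = ['']
--     for i, w in enumerate(text.split()):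
--         opts = classes.get(w, [w])
--         sep = ' ' if i else ''
--         sentences = [s + sep + o for s in sentences for o in opts]
--     return sorted(sentences)
-- ===== Notes on version B (the rewrite author's own statement) =====
-- stated objective: alternative
-- what changed: Replaces the recursive DFS over a dict-of-sets graph by an explicit-stack traversal over adjacency lists, and replaces the recursive backtracking sentence builder by an iterative left-to-right cartesian-product fold over per-word choice lists.
import Mathlib
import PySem

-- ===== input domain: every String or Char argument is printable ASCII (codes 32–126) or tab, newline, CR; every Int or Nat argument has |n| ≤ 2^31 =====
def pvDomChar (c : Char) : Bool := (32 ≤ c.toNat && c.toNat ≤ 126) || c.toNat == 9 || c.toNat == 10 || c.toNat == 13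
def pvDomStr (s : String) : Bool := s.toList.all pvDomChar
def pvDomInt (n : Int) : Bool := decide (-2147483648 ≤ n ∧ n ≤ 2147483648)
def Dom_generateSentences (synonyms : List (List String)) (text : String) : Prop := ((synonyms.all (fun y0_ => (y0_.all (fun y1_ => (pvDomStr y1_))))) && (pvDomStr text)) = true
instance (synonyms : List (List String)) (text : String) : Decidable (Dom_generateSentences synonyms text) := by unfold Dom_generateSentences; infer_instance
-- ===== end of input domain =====

-- B replaces A's recursive DFS over a dict-of-sets graph and its recursive backtracking
-- sentence builder by an explicit-stack traversal over adjacency lists and an iterative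
-- cartesian-product fold (objective: alternative; return value only, neither mutates its arguments).

-- ===== PORT A =====

-- A's recursive `dfs`; the fuel argument only makes the recursion total (it is proved
-- sufficient for every call A makes, so the computed set is exactly A's).
def dfsA (g : PySem.Dict String (PySem.Set String)) : Nat → String → PySem.Set String → PySem.Set String
  | 0, _, synset => synset
  | fuel+1, word, synset =>
    if word ∈ synset then synset
    else (g.getD word PySem.Set.empty).foldl (fun s n => dfsA g fuel n s) (synset.add word)

-- A's first loop: graph = defaultdict(set); graph[word1].add(word2); graph[word2].add(word1)
def buildGraphA (synonyms : List (List String)) : PySem.Dict String (PySem.Set String) :=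
  synonyms.foldl (fun g p =>
    match p with
    | [word1, word2] =>
        (g.modify word1 PySem.Set.empty (fun s => s.add word2)).modify word2 PySem.Set.empty (fun s => s.add word1)
    | _ => g) PySem.Dict.empty

-- A's second loop: for word in graph: if word not in synsets: dfs; for syn in set: synsets[syn] = set
def buildSynsetsA (g : PySem.Dict String (PySem.Set String)) : PySem.Dict String (PySem.Set String) :=
  g.keys.foldl (fun synsets word =>
    if synsets.contains word then synsets
    else
      let c := dfsA g (g.size + 1) word PySem.Set.empty
      c.foldl (fun s2 syn => s2.insert syn c) synsets) PySem.Dict.empty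

-- A's recursive `backtrack`
def backA (synsets : PySem.Dict String (PySem.Set String)) : List String → List String → List String → List String
  | [], path, result => result ++ [PySem.Str.join " " path]
  | word :: rest, path, result =>
    if synsets.contains word then
      (PySem.List.sorted (synsets.getD word PySem.Set.empty) (fun x => x)).foldl
        (fun res syn => backA synsets rest (path ++ [syn]) res) result
    else backA synsets rest (path ++ [word]) result

def generateSentences (synonyms : List (List String)) (text : String) : List String :=
  let graph := buildGraphA synonyms
  let synsets := buildSynsetsA graph
  let words := PySem.Str.split₀ text
  PySem.List.sorted (backA synsets words [] []) (fun x => x)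

-- ===== PORT B =====

-- B's first loop: adj.setdefault(a, []).append(b); adj.setdefault(b, []).append(a)
def buildAdjB (synonyms : List (List String)) : PySem.Dict String (List String) :=
  synonyms.foldl (fun adj p =>
    match p with
    | [a, b] => (adj.modify a [] (fun l => l ++ [b])).modify b [] (fun l => l ++ [a])
    | _ => adj) PySem.Dict.empty

-- fuel for the while loop below; only makes it total (proved sufficient)
def fuelB (adj : PySem.Dict String (List String)) : Nat :=
  2 + ((adj.values.map (fun l => l.length + 1)).sum)

-- B's while loop: u = stack.pop(); if u not in seen: seen.add(u); stack.extend(adj[u])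
def bfsB (adj : PySem.Dict String (List String)) : Nat → List String → PySem.Set String → PySem.Set String
  | 0, _, seen => seen
  | fuel+1, stack, seen =>
    match stack.getLast? with
    | none => seen
    | some u =>
      let rest := stack.dropLast
      if u ∈ seen then bfsB adj fuel rest seen
      else bfsB adj fuel (rest ++ adj.getD u []) (seen.add u)

-- B's component loop: members = sorted(seen); for u in members: classes[u] = members
def buildClassesB (adj : PySem.Dict String (List String)) : PySem.Dict String (List String) :=
  adj.keys.foldl (fun classes start =>
    if classes.contains start then classes
    else
      let seen := bfsB adj (fuelB adj) [start] PySem.Set.empty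
      let members := PySem.List.sorted seen (fun x => x)
      members.foldl (fun c u => c.insert u members) classes) PySem.Dict.empty

def generateSentences_alt (synonyms : List (List String)) (text : String) : List String :=
  let classes := buildClassesB (buildAdjB synonyms)
  let sentences := (PySem.List.enumerate (PySem.Str.split₀ text)).foldl
    (fun sentences iw =>
      let opts := (classes.get? iw.2).getD [iw.2]
      let sep := if iw.1 = 0 then "" else " "
      sentences.flatMap (fun s => opts.map (fun o => s ++ sep ++ o))) [""]
  PySem.List.sorted sentences (fun x => x)

-- ===== PRECONDITION & SPEC =====

-- Pre_ excludes exactly the inputs where A raises: a synonym entry that is not a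
-- 2-element list makes A's `for word1, word2 in synonyms` raise ValueError.
def Pre_generateSentences (synonyms : List (List String)) (text : String) : Prop :=
  ∀ p ∈ synonyms, p.length = 2
instance (synonyms : List (List String)) (text : String) : Decidable (Pre_generateSentences synonyms text) := by
  unfold Pre_generateSentences; infer_instance

def pvWitness_generateSentences : List (List String) × String := ([["a", "b"], ["b", "c"]], "a d")

def Spec_generateSentences (synonyms : List (List String)) (text : String) (out : List String) : Prop :=
  out = generateSentences_alt synonyms text
instance (synonyms : List (List String)) (text : String) (out : List String) : Decidable (Spec_generateSentences synonyms text out) := by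
  unfold Spec_generateSentences; infer_instance

-- ===== CLAIM (what is proved, stated in full; the proofs are below) =====
def Claim_equal_generateSentences : Prop := ∀ (synonyms : List (List String)) (text : String), Dom_generateSentences synonyms text → Pre_generateSentences synonyms text → Spec_generateSentences synonyms text (generateSentences synonyms text)

-- ===== LEMMAS AND PROOFS =====

-- the symmetric adjacency relation declared by the synonym pairs
def AdjP (syn : List (List String)) (x y : String) : Prop := ∃ p ∈ syn, p = [x, y] ∨ p = [y, x]

-- reachability in the synonym graph
def Reach (syn : List (List String)) : String → String → Prop := Relation.ReflTransGen (AdjP syn)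

-- cartesian product of choice lists, leftmost position most significant
def prodL : List (List String) → List (List String)
  | [] => [[]]
  | l :: ls => l.flatMap (fun x => (prodL ls).map (x :: ·))

-- " "-prefixed concatenation of a tail of words
def extS : List String → String
  | [] => ""
  | o :: t => " " ++ o ++ extS t

theorem adjP_symm {syn x y} (h : AdjP syn x y) : AdjP syn y x := by
  obtain ⟨p, hp, h | h⟩ := h
  · exact ⟨p, hp, Or.inr h⟩
  · exact ⟨p, hp, Or.inl h⟩

theorem reach_symm {syn x y} (h : Reach syn x y) : Reach syn y x :=
  Relation.ReflTransGen.symmetric (fun _ _ => adjP_symm) h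

theorem closure_char {syn} {S : List String} {w : String}
    (hw : w ∈ S)
    (hcl : ∀ u ∈ S, ∀ y, AdjP syn u y → y ∈ S)
    (hup : ∀ x ∈ S, Reach syn w x) :
    ∀ x, x ∈ S ↔ Reach syn w x := by
  intro x
  constructor
  · exact hup x
  · intro h
    induction h with
    | refl => exact hw
    | tail _ h2 ih => exact hcl _ ih _ h2

theorem graphA_getD_mem_aux (l : List (List String)) (d : PySem.Dict String (PySem.Set String))
    (hl : ∀ p ∈ l, p.length = 2) (x y : String) :
    y ∈ (l.foldl (fun g p =>
      match p with
      | [word1, word2] =>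
          (g.modify word1 PySem.Set.empty (fun s => s.add word2)).modify word2 PySem.Set.empty (fun s => s.add word1)
      | _ => g) d).getD x PySem.Set.empty
    ↔ y ∈ d.getD x PySem.Set.empty ∨ AdjP l x y := by
  induction l generalizing d with
  | nil => simp [AdjP]
  | cons p l ih =>
    have hp : p.length = 2 := hl p (by simp)
    rcases p with _ | ⟨a, _ | ⟨b, _ | ⟨c, p⟩⟩⟩ <;> simp at hp
    have hl' : ∀ q ∈ l, q.length = 2 := fun q hq => hl q (by simp [hq])
    rw [List.foldl_cons]
    show y ∈ (l.foldl _ ((d.modify a PySem.Set.empty (fun s => s.add b)).modify b PySem.Set.empty (fun s => s.add a))).getD x PySem.Set.empty ↔ _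
    rw [ih _ hl']
    have hAdj : AdjP ([a,b] :: l) x y ↔ ((a = x ∧ b = y) ∨ (a = y ∧ b = x)) ∨ AdjP l x y := by
      simp only [AdjP, List.mem_cons]
      constructor
      · rintro ⟨q, (rfl | hq), h⟩
        · simp only [List.cons.injEq, and_true] at h; tauto
        · exact Or.inr ⟨q, hq, h⟩
      · rintro ((⟨h1, h2⟩ | ⟨h1, h2⟩) | ⟨q, hq, h⟩)
        · exact ⟨[a, b], Or.inl rfl, Or.inl (by rw [h1, h2])⟩
        · exact ⟨[a, b], Or.inl rfl, Or.inr (by rw [h1, h2])⟩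
        · exact ⟨q, Or.inr hq, h⟩
    rw [hAdj]
    simp only [PySem.Dict.getD_modify]
    by_cases hab : a = b
    · subst hab
      by_cases hx : x = a <;> simp [hx, PySem.Set.mem_add] <;> tauto
    · have hba : ¬b = a := fun h => hab h.symm
      by_cases hxb : x = b <;> by_cases hxa : x = a <;>
        simp [hxb, hxa, hab, hba, PySem.Set.mem_add] <;> tauto

theorem graphA_getD_mem {syn} (hpre : ∀ p ∈ syn, p.length = 2) (x y : String) :
    y ∈ (buildGraphA syn).getD x PySem.Set.empty ↔ AdjP syn x y := by
  have := graphA_getD_mem_aux syn PySem.Dict.empty hpre x y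
  simpa [buildGraphA, PySem.Dict.getD_empty] using this

theorem adjB_getD_mem_aux (l : List (List String)) (d : PySem.Dict String (List String))
    (hl : ∀ p ∈ l, p.length = 2) (x y : String) :
    y ∈ (l.foldl (fun adj p =>
      match p with
      | [a, b] => (adj.modify a [] (fun l => l ++ [b])).modify b [] (fun l => l ++ [a])
      | _ => adj) d).getD x []
    ↔ y ∈ d.getD x [] ∨ AdjP l x y := by
  induction l generalizing d with
  | nil => simp [AdjP]
  | cons p l ih =>
    have hp : p.length = 2 := hl p (by simp)
    rcases p with _ | ⟨a, _ | ⟨b, _ | ⟨c, p⟩⟩⟩ <;> simp at hp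
    have hl' : ∀ q ∈ l, q.length = 2 := fun q hq => hl q (by simp [hq])
    rw [List.foldl_cons]
    show y ∈ (l.foldl _ ((d.modify a [] (fun l => l ++ [b])).modify b [] (fun l => l ++ [a]))).getD x [] ↔ _
    rw [ih _ hl']
    have hAdj : AdjP ([a,b] :: l) x y ↔ ((a = x ∧ b = y) ∨ (a = y ∧ b = x)) ∨ AdjP l x y := by
      simp only [AdjP, List.mem_cons]
      constructor
      · rintro ⟨q, (rfl | hq), h⟩
        · simp only [List.cons.injEq, and_true] at h; tauto
        · exact Or.inr ⟨q, hq, h⟩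
      · rintro ((⟨h1, h2⟩ | ⟨h1, h2⟩) | ⟨q, hq, h⟩)
        · exact ⟨[a, b], Or.inl rfl, Or.inl (by rw [h1, h2])⟩
        · exact ⟨[a, b], Or.inl rfl, Or.inr (by rw [h1, h2])⟩
        · exact ⟨q, Or.inr hq, h⟩
    rw [hAdj]
    simp only [PySem.Dict.getD_modify]
    by_cases hab : a = b
    · subst hab
      by_cases hx : x = a <;> simp [hx] <;> tauto
    · have hba : ¬b = a := fun h => hab h.symm
      by_cases hxb : x = b <;> by_cases hxa : x = a <;>
        simp [hxb, hxa, hab, hba] <;> tauto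

theorem adjB_getD_mem {syn} (hpre : ∀ p ∈ syn, p.length = 2) (x y : String) :
    y ∈ (buildAdjB syn).getD x [] ↔ AdjP syn x y := by
  have := adjB_getD_mem_aux syn PySem.Dict.empty hpre x y
  simpa [buildAdjB, PySem.Dict.getD_empty] using this

theorem graphA_keys_aux (l : List (List String)) (d : PySem.Dict String (PySem.Set String))
    (hl : ∀ p ∈ l, p.length = 2) (w : String) :
    w ∈ (l.foldl (fun g p =>
      match p with
      | [word1, word2] =>
          (g.modify word1 PySem.Set.empty (fun s => s.add word2)).modify word2 PySem.Set.empty (fun s => s.add word1)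
      | _ => g) d).keys
    ↔ w ∈ d.keys ∨ ∃ p ∈ l, w ∈ p := by
  induction l generalizing d with
  | nil => simp
  | cons p l ih =>
    have hp : p.length = 2 := hl p (by simp)
    rcases p with _ | ⟨a, _ | ⟨b, _ | ⟨c, p⟩⟩⟩ <;> simp at hp
    have hl' : ∀ q ∈ l, q.length = 2 := fun q hq => hl q (by simp [hq])
    rw [List.foldl_cons]
    show w ∈ (l.foldl _ ((d.modify a PySem.Set.empty (fun s => s.add b)).modify b PySem.Set.empty (fun s => s.add a))).keys ↔ _
    rw [ih _ hl']
    rw [PySem.Dict.keys_modify]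
    simp only [PySem.Dict.mem_keys_insert]
    rw [PySem.Dict.keys_modify]
    simp only [PySem.Dict.mem_keys_insert, List.mem_cons]
    constructor
    · rintro ((rfl | (rfl | h)) | h)
      · exact Or.inr ⟨[a, w], Or.inl rfl, by simp⟩
      · exact Or.inr ⟨[w, b], Or.inl rfl, by simp⟩
      · exact Or.inl h
      · exact Or.inr (h.imp fun q hq => ⟨Or.inr hq.1, hq.2⟩)
    · rintro (h | ⟨q, (rfl | hq), hw⟩)
      · exact Or.inl (Or.inr (Or.inr h))
      · simp at hw; rcases hw with rfl | rfl
        · exact Or.inl (Or.inr (Or.inl rfl))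
        · exact Or.inl (Or.inl rfl)
      · exact Or.inr ⟨q, hq, hw⟩

theorem adjB_keys_aux (l : List (List String)) (d : PySem.Dict String (List String))
    (hl : ∀ p ∈ l, p.length = 2) (w : String) :
    w ∈ (l.foldl (fun adj p =>
      match p with
      | [a, b] => (adj.modify a [] (fun l => l ++ [b])).modify b [] (fun l => l ++ [a])
      | _ => adj) d).keys
    ↔ w ∈ d.keys ∨ ∃ p ∈ l, w ∈ p := by
  induction l generalizing d with
  | nil => simp
  | cons p l ih =>
    have hp : p.length = 2 := hl p (by simp)
    rcases p with _ | ⟨a, _ | ⟨b, _ | ⟨c, p⟩⟩⟩ <;> simp at hp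
    have hl' : ∀ q ∈ l, q.length = 2 := fun q hq => hl q (by simp [hq])
    rw [List.foldl_cons]
    show w ∈ (l.foldl _ ((d.modify a [] (fun l => l ++ [b])).modify b [] (fun l => l ++ [a]))).keys ↔ _
    rw [ih _ hl']
    rw [PySem.Dict.keys_modify]
    simp only [PySem.Dict.mem_keys_insert]
    rw [PySem.Dict.keys_modify]
    simp only [PySem.Dict.mem_keys_insert, List.mem_cons]
    constructor
    · rintro ((rfl | (rfl | h)) | h)
      · exact Or.inr ⟨[a, w], Or.inl rfl, by simp⟩
      · exact Or.inr ⟨[w, b], Or.inl rfl, by simp⟩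
      · exact Or.inl h
      · exact Or.inr (h.imp fun q hq => ⟨Or.inr hq.1, hq.2⟩)
    · rintro (h | ⟨q, (rfl | hq), hw⟩)
      · exact Or.inl (Or.inr (Or.inr h))
      · simp at hw; rcases hw with rfl | rfl
        · exact Or.inl (Or.inr (Or.inl rfl))
        · exact Or.inl (Or.inl rfl)
      · exact Or.inr ⟨q, hq, hw⟩

theorem nodup_keys_graphA_aux (l : List (List String)) (d : PySem.Dict String (PySem.Set String))
    (hd : d.keys.Nodup) :
    (l.foldl (fun g p =>
      match p with
      | [word1, word2] =>
          (g.modify word1 PySem.Set.empty (fun s => s.add word2)).modify word2 PySem.Set.empty (fun s => s.add word1)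
      | _ => g) d).keys.Nodup := by
  induction l generalizing d with
  | nil => exact hd
  | cons p l ih =>
    rw [List.foldl_cons]
    rcases p with _ | ⟨a, _ | ⟨b, _ | ⟨c, p⟩⟩⟩
    · exact ih d hd
    · exact ih d hd
    · refine ih _ ?_
      rw [PySem.Dict.keys_modify]
      exact PySem.Dict.nodup_keys_insert _ _ _ (by rw [PySem.Dict.keys_modify]; exact PySem.Dict.nodup_keys_insert _ _ _ hd)
    · exact ih d hd

theorem nodup_keys_adjB_aux (l : List (List String)) (d : PySem.Dict String (List String))
    (hd : d.keys.Nodup) :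
    (l.foldl (fun adj p =>
      match p with
      | [a, b] => (adj.modify a [] (fun l => l ++ [b])).modify b [] (fun l => l ++ [a])
      | _ => adj) d).keys.Nodup := by
  induction l generalizing d with
  | nil => exact hd
  | cons p l ih =>
    rw [List.foldl_cons]
    rcases p with _ | ⟨a, _ | ⟨b, _ | ⟨c, p⟩⟩⟩
    · exact ih d hd
    · exact ih d hd
    · refine ih _ ?_
      rw [PySem.Dict.keys_modify]
      exact PySem.Dict.nodup_keys_insert _ _ _ (by rw [PySem.Dict.keys_modify]; exact PySem.Dict.nodup_keys_insert _ _ _ hd)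
    · exact ih d hd

theorem graphA_mem_keys {syn} (hpre : ∀ p ∈ syn, p.length = 2) (w : String) :
    w ∈ (buildGraphA syn).keys ↔ ∃ p ∈ syn, w ∈ p := by
  have := graphA_keys_aux syn PySem.Dict.empty hpre w
  simpa [buildGraphA] using this

theorem adjB_mem_keys {syn} (hpre : ∀ p ∈ syn, p.length = 2) (w : String) :
    w ∈ (buildAdjB syn).keys ↔ ∃ p ∈ syn, w ∈ p := by
  have := adjB_keys_aux syn PySem.Dict.empty hpre w
  simpa [buildAdjB] using this

theorem nodup_keys_graphA (syn : List (List String)) : (buildGraphA syn).keys.Nodup :=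
  nodup_keys_graphA_aux syn PySem.Dict.empty (by simp)

theorem nodup_keys_adjB (syn : List (List String)) : (buildAdjB syn).keys.Nodup :=
  nodup_keys_adjB_aux syn PySem.Dict.empty (by simp)

theorem adjP_mem_right {syn x y} (h : AdjP syn x y) : ∃ p ∈ syn, y ∈ p := by
  obtain ⟨p, hp, h | h⟩ := h <;> subst h <;> exact ⟨_, hp, by simp⟩

theorem reach_words {syn x y} (h : Reach syn x y) (hx : ∃ p ∈ syn, x ∈ p) : ∃ p ∈ syn, y ∈ p := by
  induction h with
  | refl => exact hx
  | tail _ h2 ih => exact adjP_mem_right h2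

-- get? after inserting a constant value at every key of c
theorem get?_foldl_insert_const {ν : Type} [DecidableEq ν] (c : List String) (v : ν)
    (d : PySem.Dict String ν) (w : String) :
    (c.foldl (fun t y => t.insert y v) d).get? w = if w ∈ c then some v else d.get? w := by
  induction c generalizing d with
  | nil => simp
  | cons y c ih =>
    simp only [List.foldl_cons, ih, PySem.Dict.get?_insert, List.mem_cons]
    by_cases h1 : w ∈ c <;> by_cases h2 : w = y <;> simp [h1, h2]

-- ---------- DFS (port A) ----------

-- measure for dfs fuel
def measA (U : List String) (s : List String) : Nat := (U.filter (fun k => decide (k ∉ s))).length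

theorem filter_sum_drop {U : List String} (hU : U.Nodup) {u : String} (hu : u ∈ U) {s s' : List String}
    (hus : u ∉ s) (hs' : ∀ k, k ∈ s' ↔ k ∈ s ∨ k = u) (f : String → Nat) :
    ((U.filter (fun k => decide (k ∉ s))).map f).sum
      = f u + ((U.filter (fun k => decide (k ∉ s'))).map f).sum := by
  induction U with
  | nil => simp at hu
  | cons h tU ih =>
    obtain ⟨hh, htU⟩ := List.nodup_cons.mp hU
    rcases List.mem_cons.mp hu with rfl | hu'
    · have e2 : (fun k => decide (k ∉ s)) u = true := by simp [hus]
      have e1 : (fun k => decide (k ∉ s')) u = false := by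
        simp only [decide_eq_false_iff_not, not_not]
        exact (hs' u).mpr (Or.inr rfl)
      have hmem : u ∈ s' := (hs' u).mpr (Or.inr rfl)
      rw [show List.filter (fun k => decide (k ∉ s)) (u :: tU) = u :: tU.filter (fun k => decide (k ∉ s)) by simp [hus],
          show List.filter (fun k => decide (k ∉ s')) (u :: tU) = tU.filter (fun k => decide (k ∉ s')) by simp [hmem]]
      have : tU.filter (fun k => decide (k ∉ s')) = tU.filter (fun k => decide (k ∉ s)) := by
        refine List.filter_congr ?_
        intro k hk
        have hk_ne : k ≠ u := fun e => hh (e ▸ hk)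
        simp [hs' k, hk_ne]
      rw [this]; simp
    · have hne : h ≠ u := fun e => hh (e ▸ hu')
      have e3 : (h ∈ s') ↔ (h ∈ s) := by simp [hs' h, hne]
      by_cases hc : h ∈ s
      · rw [show List.filter (fun k => decide (k ∉ s)) (h :: tU) = tU.filter (fun k => decide (k ∉ s)) by simp [hc],
            show List.filter (fun k => decide (k ∉ s')) (h :: tU) = tU.filter (fun k => decide (k ∉ s')) by simp [e3.mpr hc]]
        exact ih htU hu'
      · have hc' : h ∉ s' := fun hx => hc (e3.mp hx)
        rw [show List.filter (fun k => decide (k ∉ s)) (h :: tU) = h :: tU.filter (fun k => decide (k ∉ s)) by simp [hc],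
            show List.filter (fun k => decide (k ∉ s')) (h :: tU) = h :: tU.filter (fun k => decide (k ∉ s')) by simp [hc']]
        simp only [List.map_cons, List.sum_cons]
        rw [ih htU hu']
        omega

theorem measA_drop {U : List String} (hU : U.Nodup) {u : String} (hu : u ∈ U) {s : List String}
    (hus : u ∉ s) (s' : List String) (hs' : ∀ k, (k ∈ s' ↔ k ∈ s ∨ k = u)) :
    measA U s' + 1 = measA U s := by
  have h := filter_sum_drop hU hu hus hs' (fun _ => 1)
  unfold measA
  have l1 : ∀ (l : List String), ((l.map (fun _ => 1)).sum) = l.length := by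
    intro l; induction l with
    | nil => rfl
    | cons a l ih => simp; omega
  rw [l1, l1] at h
  omega

theorem measA_antitone (U : List String) {s t : List String} (h : ∀ k ∈ s, k ∈ t) :
    measA U t ≤ measA U s := by
  refine List.Sublist.length_le (List.monotone_filter_right _ ?_)
  intro a ha
  simp only [decide_eq_true_eq] at *
  exact fun hmem => ha (h a hmem)

theorem dfsA_subset_reach {syn} (hpre : ∀ p ∈ syn, p.length = 2) :
    ∀ (f : Nat) (w : String) (s : PySem.Set String) (x : String),
      x ∈ dfsA (buildGraphA syn) f w s → x ∈ s ∨ Reach syn w x := by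
  intro f
  induction f with
  | zero => intro w s x hx; exact Or.inl hx
  | succ f ih =>
    intro w s x hx
    simp only [dfsA] at hx
    by_cases hws : w ∈ s
    · rw [if_pos hws] at hx; exact Or.inl hx
    · rw [if_neg hws] at hx
      have fold : ∀ (ns : List String) (t : PySem.Set String),
          x ∈ ns.foldl (fun s n => dfsA (buildGraphA syn) f n s) t → x ∈ t ∨ ∃ n ∈ ns, Reach syn n x := by
        intro ns
        induction ns with
        | nil => intro t h; exact Or.inl h
        | cons n ns ihn =>
          intro t h
          rcases ihn _ h with h1 | ⟨m, hm, hr⟩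
          · rcases ih n t x h1 with h2 | h2
            · exact Or.inl h2
            · exact Or.inr ⟨n, by simp, h2⟩
          · exact Or.inr ⟨m, by simp [hm], hr⟩
      rcases fold _ _ hx with h1 | ⟨n, hn, hr⟩
      · rcases (PySem.Set.mem_add s w x).mp h1 with h2 | rfl
        · exact Or.inl h2
        · exact Or.inr Relation.ReflTransGen.refl
      · exact Or.inr (Relation.ReflTransGen.head ((graphA_getD_mem hpre w n).mp hn) hr)

theorem dfsA_complete {syn} (hpre : ∀ p ∈ syn, p.length = 2) :
    ∀ (f : Nat) (w : String) (s : PySem.Set String),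
      w ∈ (buildGraphA syn).keys →
      (∀ x ∈ s, x ∈ (buildGraphA syn).keys) →
      s.Nodup →
      measA (buildGraphA syn).keys s < f →
      (∀ x ∈ s, x ∈ dfsA (buildGraphA syn) f w s) ∧
      w ∈ dfsA (buildGraphA syn) f w s ∧
      (∀ x ∈ dfsA (buildGraphA syn) f w s, x ∈ (buildGraphA syn).keys) ∧
      (dfsA (buildGraphA syn) f w s).Nodup ∧
      (∀ u ∈ dfsA (buildGraphA syn) f w s, u ∉ s →
        ∀ y ∈ (buildGraphA syn).getD u PySem.Set.empty, y ∈ dfsA (buildGraphA syn) f w s) := by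
  have hAdjU : ∀ u y, y ∈ (buildGraphA syn).getD u PySem.Set.empty → y ∈ (buildGraphA syn).keys := by
    intro u y hy
    exact (graphA_mem_keys hpre y).mpr (adjP_mem_right ((graphA_getD_mem hpre u y).mp hy))
  intro f
  induction f with
  | zero => intro w s _ _ _ hm; exact absurd hm (Nat.not_lt_zero _)
  | succ f ih =>
    intro w s hw hs hnd hm
    by_cases hws : w ∈ s
    · simp only [dfsA, if_pos hws]
      exact ⟨fun x hx => hx, hws, hs, hnd, fun u hu hus => (hus hu).elim⟩
    · simp only [dfsA, if_neg hws]
      have hs'_mem : ∀ k, k ∈ PySem.Set.add s w ↔ k ∈ s ∨ k = w := fun k => PySem.Set.mem_add s w k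
      have hs'U : ∀ x ∈ PySem.Set.add s w, x ∈ (buildGraphA syn).keys := by
        intro x hx
        rcases (hs'_mem x).mp hx with h | rfl
        · exact hs x h
        · exact hw
      have hs'nd : (PySem.Set.add s w).Nodup := PySem.Set.nodup_add s w hnd
      have hms' : measA (buildGraphA syn).keys (PySem.Set.add s w) + 1 = measA (buildGraphA syn).keys s :=
        measA_drop (nodup_keys_graphA syn) hw hws _ hs'_mem
      have hfuel : measA (buildGraphA syn).keys (PySem.Set.add s w) < f := by omega
      have fold : ∀ (ns : List String), (∀ n ∈ ns, n ∈ (buildGraphA syn).keys) →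
          ∀ (t : PySem.Set String),
          (∀ x ∈ PySem.Set.add s w, x ∈ t) →
          (∀ x ∈ t, x ∈ (buildGraphA syn).keys) →
          t.Nodup →
          (∀ u ∈ t, u ∉ PySem.Set.add s w → ∀ y ∈ (buildGraphA syn).getD u PySem.Set.empty, y ∈ t) →
          (∀ x ∈ t, x ∈ ns.foldl (fun s n => dfsA (buildGraphA syn) f n s) t) ∧
          (∀ n ∈ ns, n ∈ ns.foldl (fun s n => dfsA (buildGraphA syn) f n s) t) ∧
          (∀ x ∈ ns.foldl (fun s n => dfsA (buildGraphA syn) f n s) t, x ∈ (buildGraphA syn).keys) ∧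
          (ns.foldl (fun s n => dfsA (buildGraphA syn) f n s) t).Nodup ∧
          (∀ x ∈ PySem.Set.add s w, x ∈ ns.foldl (fun s n => dfsA (buildGraphA syn) f n s) t) ∧
          (∀ u ∈ ns.foldl (fun s n => dfsA (buildGraphA syn) f n s) t, u ∉ PySem.Set.add s w →
            ∀ y ∈ (buildGraphA syn).getD u PySem.Set.empty, y ∈ ns.foldl (fun s n => dfsA (buildGraphA syn) f n s) t) := by
        intro ns
        induction ns with
        | nil =>
          intro _ t h1 h2 h3 h4
          exact ⟨fun x hx => hx, by simp, h2, h3, h1, h4⟩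
        | cons n ns ihn =>
          intro hnsU t ht1 ht2 ht3 ht4
          have hnU : n ∈ (buildGraphA syn).keys := hnsU n (by simp)
          have htm : measA (buildGraphA syn).keys t < f :=
            lt_of_le_of_lt (measA_antitone _ ht1) hfuel
          obtain ⟨c1, c2, c3, c4, c5⟩ := ih n t hnU ht2 ht3 htm
          have ht'1 : ∀ x ∈ PySem.Set.add s w, x ∈ dfsA (buildGraphA syn) f n t := fun x hx => c1 x (ht1 x hx)
          have ht'4 : ∀ u ∈ dfsA (buildGraphA syn) f n t, u ∉ PySem.Set.add s w →
              ∀ y ∈ (buildGraphA syn).getD u PySem.Set.empty, y ∈ dfsA (buildGraphA syn) f n t := by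
            intro u hu hus y hy
            by_cases hut : u ∈ t
            · exact c1 y (ht4 u hut hus y hy)
            · exact c5 u hu hut y hy
          obtain ⟨d1, d2, d3, d4, d5, d6⟩ :=
            ihn (fun m hm' => hnsU m (by simp [hm'])) (dfsA (buildGraphA syn) f n t) ht'1 c3 c4 ht'4
          refine ⟨fun x hx => d1 x (c1 x hx), ?_, d3, d4, d5, d6⟩
          intro m hm'
          rcases List.mem_cons.mp hm' with rfl | hm2
          · exact d1 m c2
          · exact d2 m hm2
      obtain ⟨e1, e2, e3, e4, e5, e6⟩ :=
        fold _ (fun n hn => hAdjU w n hn) (PySem.Set.add s w)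
          (fun x hx => hx) hs'U hs'nd (fun u hu hus => (hus hu).elim)
      refine ⟨fun x hx => e5 x ((hs'_mem x).mpr (Or.inl hx)), e5 w ((hs'_mem w).mpr (Or.inr rfl)), e3, e4, ?_⟩
      intro u hu hus y hy
      by_cases huw : u = w
      · subst huw; exact e2 y hy
      · exact e6 u hu (fun hin => ((hs'_mem u).mp hin).elim hus huw) y hy

theorem compA_spec {syn} (hpre : ∀ p ∈ syn, p.length = 2) {w : String}
    (hw : w ∈ (buildGraphA syn).keys) :
    (dfsA (buildGraphA syn) ((buildGraphA syn).size + 1) w PySem.Set.empty).Nodup ∧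
    ∀ x, x ∈ dfsA (buildGraphA syn) ((buildGraphA syn).size + 1) w PySem.Set.empty ↔ Reach syn w x := by
  have hmeas : measA (buildGraphA syn).keys PySem.Set.empty < (buildGraphA syn).size + 1 := by
    have h1 : measA (buildGraphA syn).keys PySem.Set.empty = (buildGraphA syn).keys.length := by
      simp [measA, PySem.Set.empty]
    have h2 : (buildGraphA syn).keys.length = (buildGraphA syn).size := by
      simp [PySem.Dict.keys, PySem.Dict.size]
    omega
  obtain ⟨_, hwin, _, hnd, hcl⟩ :=
    dfsA_complete hpre ((buildGraphA syn).size + 1) w PySem.Set.empty hw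
      (by intro x hx; simp [PySem.Set.empty] at hx) (by simp [PySem.Set.empty]) hmeas
  refine ⟨hnd, closure_char hwin ?_ ?_⟩
  · intro u hu y hy
    exact hcl u hu (by simp [PySem.Set.empty]) y ((graphA_getD_mem hpre u y).mpr hy)
  · intro x hx
    rcases dfsA_subset_reach hpre _ w _ x hx with h | h
    · simp [PySem.Set.empty] at h
    · exact h

-- ---------- stack traversal (port B) ----------

def potB (adj : PySem.Dict String (List String)) (stack : List String) (seen : List String) : Nat :=
  stack.length + ((adj.keys.filter (fun k => decide (k ∉ seen))).map (fun k => (adj.getD k []).length + 1)).sum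

theorem bfsB_subset_reach {syn} (hpre : ∀ p ∈ syn, p.length = 2) :
    ∀ (f : Nat) (stack : List String) (seen : PySem.Set String) (x : String),
      x ∈ bfsB (buildAdjB syn) f stack seen → x ∈ seen ∨ ∃ u ∈ stack, Reach syn u x := by
  intro f
  induction f with
  | zero => intro stack seen x hx; exact Or.inl hx
  | succ f ih =>
    intro stack seen x hx
    cases hlast : stack.getLast? with
    | none => simp only [bfsB, hlast] at hx; exact Or.inl hx
    | some u =>
      have hu : u ∈ stack := List.mem_of_getLast? hlast
      simp only [bfsB, hlast] at hx
      by_cases hus : u ∈ seen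
      · rw [if_pos hus] at hx
        rcases ih _ _ x hx with h | ⟨v, hv, hr⟩
        · exact Or.inl h
        · exact Or.inr ⟨v, (List.dropLast_sublist stack).subset hv, hr⟩
      · rw [if_neg hus] at hx
        rcases ih _ _ x hx with h | ⟨v, hv, hr⟩
        · rcases (PySem.Set.mem_add seen u x).mp h with h2 | rfl
          · exact Or.inl h2
          · exact Or.inr ⟨x, hu, Relation.ReflTransGen.refl⟩
        · rcases List.mem_append.mp hv with h2 | h2
          · exact Or.inr ⟨v, (List.dropLast_sublist stack).subset h2, hr⟩
          · exact Or.inr ⟨u, hu, Relation.ReflTransGen.head ((adjB_getD_mem hpre u v).mp h2) hr⟩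

theorem bfsB_complete {syn} (hpre : ∀ p ∈ syn, p.length = 2) :
    ∀ (f : Nat) (stack : List String) (seen : PySem.Set String),
      (∀ x ∈ stack, x ∈ (buildAdjB syn).keys) →
      (∀ x ∈ seen, x ∈ (buildAdjB syn).keys) →
      seen.Nodup →
      potB (buildAdjB syn) stack seen ≤ f →
      (∀ x ∈ seen, x ∈ bfsB (buildAdjB syn) f stack seen) ∧
      (∀ u ∈ stack, u ∈ bfsB (buildAdjB syn) f stack seen) ∧
      (bfsB (buildAdjB syn) f stack seen).Nodup ∧
      (∀ x ∈ bfsB (buildAdjB syn) f stack seen, x ∈ (buildAdjB syn).keys) ∧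
      (∀ u ∈ bfsB (buildAdjB syn) f stack seen, u ∉ seen →
        ∀ y ∈ (buildAdjB syn).getD u [], y ∈ bfsB (buildAdjB syn) f stack seen) := by
  intro f
  induction f with
  | zero =>
    intro stack seen h1 h2 h3 hpot
    have hstack : stack = [] := by
      simp only [potB] at hpot
      exact List.eq_nil_iff_length_eq_zero.mpr (by omega)
    subst hstack
    simp only [bfsB]
    exact ⟨fun x hx => hx, by simp, h3, h2, fun u hu hus => (hus hu).elim⟩
  | succ f ih =>
    intro stack seen h1 h2 h3 hpot
    cases hlast : stack.getLast? with
    | none =>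
      have hstack : stack = [] := List.getLast?_eq_none_iff.mp hlast
      subst hstack
      simp only [bfsB, List.getLast?_nil]
      exact ⟨fun x hx => hx, by simp, h3, h2, fun u hu hus => (hus hu).elim⟩
    | some u =>
      have hne : stack ≠ [] := by rintro rfl; simp at hlast
      have hu : u ∈ stack := List.mem_of_getLast? hlast
      have hsplit : stack.dropLast ++ [u] = stack := by
        have h := List.dropLast_concat_getLast hne
        have h2' := List.getLast?_eq_some_getLast hne
        rw [hlast] at h2'
        rw [← Option.some_inj.mp h2'] at h
        exact h
      have hlen : stack.length = stack.dropLast.length + 1 := by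
        rw [List.length_dropLast]
        have : 0 < stack.length := List.length_pos_iff.mpr hne
        omega
      have hrestsub : ∀ x ∈ stack.dropLast, x ∈ stack :=
        fun x hx => (List.dropLast_sublist stack).subset hx
      simp only [bfsB, hlast]
      by_cases hus : u ∈ seen
      · rw [if_pos hus]
        have hpot' : potB (buildAdjB syn) stack.dropLast seen ≤ f := by
          simp only [potB] at hpot ⊢
          omega
        obtain ⟨c1, c2, c3, c4, c5⟩ := ih stack.dropLast seen (fun x hx => h1 x (hrestsub x hx)) h2 h3 hpot'
        refine ⟨c1, ?_, c3, c4, c5⟩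
        intro v hv
        have hv' : v ∈ stack.dropLast ++ [u] := by rw [hsplit]; exact hv
        rcases List.mem_append.mp hv' with h | h
        · exact c2 v h
        · have : v = u := by simpa using h
          subst this
          exact c1 v hus
      · rw [if_neg hus]
        have hukeys : u ∈ (buildAdjB syn).keys := h1 u hu
        have hnssub : ∀ y ∈ (buildAdjB syn).getD u [], y ∈ (buildAdjB syn).keys := fun y hy =>
          (adjB_mem_keys hpre y).mpr (adjP_mem_right ((adjB_getD_mem hpre u y).mp hy))
        have hsum := filter_sum_drop (nodup_keys_adjB syn) hukeys hus
          (fun k => PySem.Set.mem_add seen u k) (fun k => ((buildAdjB syn).getD k []).length + 1)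
        have hpot' : potB (buildAdjB syn) (stack.dropLast ++ (buildAdjB syn).getD u []) (PySem.Set.add seen u) ≤ f := by
          simp only [potB, List.length_append] at hpot ⊢
          omega
        obtain ⟨c1, c2, c3, c4, c5⟩ := ih (stack.dropLast ++ (buildAdjB syn).getD u []) (PySem.Set.add seen u)
          (by
            intro x hx
            rcases List.mem_append.mp hx with h | h
            · exact h1 x (hrestsub x h)
            · exact hnssub x h)
          (by
            intro x hx
            rcases (PySem.Set.mem_add seen u x).mp hx with h | rfl
            · exact h2 x h
            · exact hukeys)
          (PySem.Set.nodup_add seen u h3) hpot'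
        refine ⟨fun x hx => c1 x ((PySem.Set.mem_add seen u x).mpr (Or.inl hx)), ?_, c3, c4, ?_⟩
        · intro v hv
          have hv' : v ∈ stack.dropLast ++ [u] := by rw [hsplit]; exact hv
          rcases List.mem_append.mp hv' with h | h
          · exact c2 v (List.mem_append.mpr (Or.inl h))
          · have : v = u := by simpa using h
            subst this
            exact c1 v ((PySem.Set.mem_add seen v v).mpr (Or.inr rfl))
        · intro v hv hvseen y hy
          by_cases hvu : v = u
          · subst hvu
            exact c2 y (List.mem_append.mpr (Or.inr hy))
          · exact c5 v hv (fun hin => ((PySem.Set.mem_add seen u v).mp hin).elim hvseen hvu) y hy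

theorem compB_spec {syn} (hpre : ∀ p ∈ syn, p.length = 2) {w : String}
    (hw : w ∈ (buildAdjB syn).keys) :
    (bfsB (buildAdjB syn) (fuelB (buildAdjB syn)) [w] PySem.Set.empty).Nodup ∧
    ∀ x, x ∈ bfsB (buildAdjB syn) (fuelB (buildAdjB syn)) [w] PySem.Set.empty ↔ Reach syn w x := by
  have hpot : potB (buildAdjB syn) [w] PySem.Set.empty ≤ fuelB (buildAdjB syn) := by
    have hfilter : (buildAdjB syn).keys.filter (fun k => decide (k ∉ (PySem.Set.empty : PySem.Set String)))
        = (buildAdjB syn).keys := by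
      simp [PySem.Set.empty]
    have hvals : (buildAdjB syn).values = (buildAdjB syn).keys.map (fun k => (buildAdjB syn).getD k []) := by
      have := PySem.Dict.items_eq_map_keys (buildAdjB syn) (nodup_keys_adjB syn) ([] : List String)
      calc (buildAdjB syn).values = (buildAdjB syn).items.map Prod.snd := by simp [PySem.Dict.values]
        _ = _ := by rw [this]; simp [Function.comp]
    simp only [potB, fuelB, hfilter, hvals, List.map_map, List.length_cons, List.length_nil]
    have haux : ∀ (l : List String) (g : String → Nat), (l.map (fun k => g k + 1)).sum = (l.map g).sum + l.length := by
      intro l g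
      induction l with
      | nil => simp
      | cons a l ih => simp [ih]; omega
    have h1 := haux (buildAdjB syn).keys (fun k => ((buildAdjB syn).getD k []).length)
    simp only [Function.comp_def]
    omega
  obtain ⟨_, hwin, hnd, _, hcl⟩ :=
    bfsB_complete hpre (fuelB (buildAdjB syn)) [w] PySem.Set.empty
      (by intro x hx; simpa using (by simpa using hx : x = w) ▸ hw)
      (by intro x hx; simp [PySem.Set.empty] at hx)
      (by simp [PySem.Set.empty]) hpot
  refine ⟨hnd, closure_char (hwin w (by simp)) ?_ ?_⟩
  · intro u hu y hy
    exact hcl u hu (by simp [PySem.Set.empty]) y ((adjB_getD_mem hpre u y).mpr hy)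
  · intro x hx
    rcases bfsB_subset_reach hpre _ _ _ x hx with h | ⟨v, hv, hr⟩
    · simp [PySem.Set.empty] at h
    · have : v = w := by simpa using hv
      subst this
      exact hr

-- ---------- the two word→class dictionaries ----------

theorem synsetsA_spec {syn} (hpre : ∀ p ∈ syn, p.length = 2) :
    (∀ w, (buildSynsetsA (buildGraphA syn)).contains w = true ↔ w ∈ (buildGraphA syn).keys) ∧
    (∀ w v, (buildSynsetsA (buildGraphA syn)).get? w = some v →
      v.Nodup ∧ ∀ x, x ∈ v ↔ Reach syn w x) := by
  have hreach : ∀ {a b : String}, a ∈ (buildGraphA syn).keys → Reach syn a b → b ∈ (buildGraphA syn).keys := by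
    intro a b ha h
    exact (graphA_mem_keys hpre b).mpr (reach_words h ((graphA_mem_keys hpre a).mp ha))
  have fold : ∀ (l : List String), (∀ s ∈ l, s ∈ (buildGraphA syn).keys) →
      ∀ (d : PySem.Dict String (PySem.Set String)),
      (∀ w, d.contains w = true → w ∈ (buildGraphA syn).keys) →
      (∀ w v, d.get? w = some v → v.Nodup ∧ ∀ x, x ∈ v ↔ Reach syn w x) →
      (∀ w, (l.foldl (fun synsets word =>
          if synsets.contains word then synsets
          else
            let c := dfsA (buildGraphA syn) ((buildGraphA syn).size + 1) word PySem.Set.empty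
            c.foldl (fun s2 syn' => s2.insert syn' c) synsets) d).contains w = true →
        w ∈ (buildGraphA syn).keys) ∧
      (∀ w v, (l.foldl (fun synsets word =>
          if synsets.contains word then synsets
          else
            let c := dfsA (buildGraphA syn) ((buildGraphA syn).size + 1) word PySem.Set.empty
            c.foldl (fun s2 syn' => s2.insert syn' c) synsets) d).get? w = some v →
        v.Nodup ∧ ∀ x, x ∈ v ↔ Reach syn w x) ∧
      (∀ w, d.contains w = true → (l.foldl (fun synsets word =>
          if synsets.contains word then synsets
          else
            let c := dfsA (buildGraphA syn) ((buildGraphA syn).size + 1) word PySem.Set.empty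
            c.foldl (fun s2 syn' => s2.insert syn' c) synsets) d).contains w = true) ∧
      (∀ s ∈ l, (l.foldl (fun synsets word =>
          if synsets.contains word then synsets
          else
            let c := dfsA (buildGraphA syn) ((buildGraphA syn).size + 1) word PySem.Set.empty
            c.foldl (fun s2 syn' => s2.insert syn' c) synsets) d).contains s = true) := by
    intro l
    induction l with
    | nil =>
      intro _ d hd1 hd2
      exact ⟨hd1, hd2, fun w h => h, by simp⟩
    | cons s l ihl =>
      intro hl d hd1 hd2
      have hskeys : s ∈ (buildGraphA syn).keys := hl s (by simp)
      rw [List.foldl_cons]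
      by_cases hc : d.contains s = true
      · rw [if_pos hc]
        obtain ⟨p1, p2, p3, p4⟩ := ihl (fun x hx => hl x (by simp [hx])) d hd1 hd2
        refine ⟨p1, p2, p3, ?_⟩
        intro x hx
        rcases List.mem_cons.mp hx with rfl | hx2
        · exact p3 x hc
        · exact p4 x hx2
      · rw [if_neg hc]
        obtain ⟨hcnd, hcmem⟩ := compA_spec hpre hskeys
        have hcont1 : ∀ w, ((dfsA (buildGraphA syn) ((buildGraphA syn).size + 1) s PySem.Set.empty).foldl
            (fun s2 syn' => s2.insert syn' (dfsA (buildGraphA syn) ((buildGraphA syn).size + 1) s PySem.Set.empty)) d).contains w = true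
            ↔ d.contains w = true ∨ w ∈ dfsA (buildGraphA syn) ((buildGraphA syn).size + 1) s PySem.Set.empty := by
          intro w
          rw [PySem.Dict.contains_iff_mem_keys, PySem.Dict.keys_foldl_insert, PySem.Set.mem_update,
            ← PySem.Dict.contains_iff_mem_keys]
        have hget1 : ∀ w, ((dfsA (buildGraphA syn) ((buildGraphA syn).size + 1) s PySem.Set.empty).foldl
            (fun s2 syn' => s2.insert syn' (dfsA (buildGraphA syn) ((buildGraphA syn).size + 1) s PySem.Set.empty)) d).get? w
            = if w ∈ dfsA (buildGraphA syn) ((buildGraphA syn).size + 1) s PySem.Set.empty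
              then some (dfsA (buildGraphA syn) ((buildGraphA syn).size + 1) s PySem.Set.empty)
              else d.get? w := fun w => get?_foldl_insert_const _ _ d w
        have inv1 : ∀ w, ((dfsA (buildGraphA syn) ((buildGraphA syn).size + 1) s PySem.Set.empty).foldl
            (fun s2 syn' => s2.insert syn' (dfsA (buildGraphA syn) ((buildGraphA syn).size + 1) s PySem.Set.empty)) d).contains w = true
            → w ∈ (buildGraphA syn).keys := by
          intro w hw
          rcases (hcont1 w).mp hw with h | h
          · exact hd1 w h
          · exact hreach hskeys ((hcmem w).mp h)
        have inv2 : ∀ w v, ((dfsA (buildGraphA syn) ((buildGraphA syn).size + 1) s PySem.Set.empty).foldl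
            (fun s2 syn' => s2.insert syn' (dfsA (buildGraphA syn) ((buildGraphA syn).size + 1) s PySem.Set.empty)) d).get? w = some v
            → v.Nodup ∧ ∀ x, x ∈ v ↔ Reach syn w x := by
          intro w v hv
          rw [hget1 w] at hv
          by_cases hwc : w ∈ dfsA (buildGraphA syn) ((buildGraphA syn).size + 1) s PySem.Set.empty
          · rw [if_pos hwc] at hv
            cases hv
            have hsw : Reach syn s w := (hcmem w).mp hwc
            refine ⟨hcnd, fun x => (hcmem x).trans ?_⟩
            exact ⟨fun h => Relation.ReflTransGen.trans (reach_symm hsw) h,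
                   fun h => Relation.ReflTransGen.trans hsw h⟩
          · rw [if_neg hwc] at hv
            exact hd2 w v hv
        obtain ⟨p1, p2, p3, p4⟩ := ihl (fun x hx => hl x (by simp [hx])) _ inv1 inv2
        refine ⟨p1, p2, fun w hw => p3 w ((hcont1 w).mpr (Or.inl hw)), ?_⟩
        intro x hx
        rcases List.mem_cons.mp hx with rfl | hx2
        · exact p3 x ((hcont1 x).mpr (Or.inr ((hcmem x).mpr Relation.ReflTransGen.refl)))
        · exact p4 x hx2
  obtain ⟨p1, p2, _, p4⟩ := fold (buildGraphA syn).keys (fun x hx => hx) PySem.Dict.empty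
    (by intro w h; rw [PySem.Dict.contains_empty] at h; cases h)
    (by intro w v h; rw [PySem.Dict.get?_empty] at h; cases h)
  exact ⟨fun w => ⟨p1 w, p4 w⟩, p2⟩

theorem classesB_spec {syn} (hpre : ∀ p ∈ syn, p.length = 2) :
    (∀ w, (buildClassesB (buildAdjB syn)).contains w = true ↔ w ∈ (buildAdjB syn).keys) ∧
    (∀ w v, (buildClassesB (buildAdjB syn)).get? w = some v →
      ∃ c, c.Nodup ∧ (∀ x, x ∈ c ↔ Reach syn w x) ∧ v = PySem.List.sorted c (fun x => x)) := by
  have hreach : ∀ {a b : String}, a ∈ (buildAdjB syn).keys → Reach syn a b → b ∈ (buildAdjB syn).keys := by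
    intro a b ha h
    exact (adjB_mem_keys hpre b).mpr (reach_words h ((adjB_mem_keys hpre a).mp ha))
  have fold : ∀ (l : List String), (∀ s ∈ l, s ∈ (buildAdjB syn).keys) →
      ∀ (d : PySem.Dict String (List String)),
      (∀ w, d.contains w = true → w ∈ (buildAdjB syn).keys) →
      (∀ w v, d.get? w = some v → ∃ c, c.Nodup ∧ (∀ x, x ∈ c ↔ Reach syn w x) ∧ v = PySem.List.sorted c (fun x => x)) →
      (∀ w, (l.foldl (fun classes start =>
          if classes.contains start then classes
          else
            let seen := bfsB (buildAdjB syn) (fuelB (buildAdjB syn)) [start] PySem.Set.empty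
            let members := PySem.List.sorted seen (fun x => x)
            members.foldl (fun c u => c.insert u members) classes) d).contains w = true →
        w ∈ (buildAdjB syn).keys) ∧
      (∀ w v, (l.foldl (fun classes start =>
          if classes.contains start then classes
          else
            let seen := bfsB (buildAdjB syn) (fuelB (buildAdjB syn)) [start] PySem.Set.empty
            let members := PySem.List.sorted seen (fun x => x)
            members.foldl (fun c u => c.insert u members) classes) d).get? w = some v →
        ∃ c, c.Nodup ∧ (∀ x, x ∈ c ↔ Reach syn w x) ∧ v = PySem.List.sorted c (fun x => x)) ∧
      (∀ w, d.contains w = true → (l.foldl (fun classes start =>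
          if classes.contains start then classes
          else
            let seen := bfsB (buildAdjB syn) (fuelB (buildAdjB syn)) [start] PySem.Set.empty
            let members := PySem.List.sorted seen (fun x => x)
            members.foldl (fun c u => c.insert u members) classes) d).contains w = true) ∧
      (∀ s ∈ l, (l.foldl (fun classes start =>
          if classes.contains start then classes
          else
            let seen := bfsB (buildAdjB syn) (fuelB (buildAdjB syn)) [start] PySem.Set.empty
            let members := PySem.List.sorted seen (fun x => x)
            members.foldl (fun c u => c.insert u members) classes) d).contains s = true) := by
    intro l
    induction l with
    | nil =>
      intro _ d hd1 hd2
      exact ⟨hd1, hd2, fun w h => h, by simp⟩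
    | cons s l ihl =>
      intro hl d hd1 hd2
      have hskeys : s ∈ (buildAdjB syn).keys := hl s (by simp)
      rw [List.foldl_cons]
      by_cases hc : d.contains s = true
      · rw [if_pos hc]
        obtain ⟨p1, p2, p3, p4⟩ := ihl (fun x hx => hl x (by simp [hx])) d hd1 hd2
        refine ⟨p1, p2, p3, ?_⟩
        intro x hx
        rcases List.mem_cons.mp hx with rfl | hx2
        · exact p3 x hc
        · exact p4 x hx2
      · rw [if_neg hc]
        obtain ⟨hcnd, hcmem⟩ := compB_spec hpre hskeys
        have hmm : ∀ x, x ∈ PySem.List.sorted (bfsB (buildAdjB syn) (fuelB (buildAdjB syn)) [s] PySem.Set.empty) (fun x => x)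
            ↔ x ∈ bfsB (buildAdjB syn) (fuelB (buildAdjB syn)) [s] PySem.Set.empty := by
          intro x
          exact (PySem.List.sorted_perm _ (fun x => x) false).mem_iff
        have hcont1 : ∀ w, ((PySem.List.sorted (bfsB (buildAdjB syn) (fuelB (buildAdjB syn)) [s] PySem.Set.empty) (fun x => x)).foldl
            (fun c u => c.insert u (PySem.List.sorted (bfsB (buildAdjB syn) (fuelB (buildAdjB syn)) [s] PySem.Set.empty) (fun x => x))) d).contains w = true
            ↔ d.contains w = true ∨ w ∈ bfsB (buildAdjB syn) (fuelB (buildAdjB syn)) [s] PySem.Set.empty := by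
          intro w
          rw [PySem.Dict.contains_iff_mem_keys, PySem.Dict.keys_foldl_insert, PySem.Set.mem_update,
            ← PySem.Dict.contains_iff_mem_keys, hmm w]
        have hget1 : ∀ w, ((PySem.List.sorted (bfsB (buildAdjB syn) (fuelB (buildAdjB syn)) [s] PySem.Set.empty) (fun x => x)).foldl
            (fun c u => c.insert u (PySem.List.sorted (bfsB (buildAdjB syn) (fuelB (buildAdjB syn)) [s] PySem.Set.empty) (fun x => x))) d).get? w
            = if w ∈ PySem.List.sorted (bfsB (buildAdjB syn) (fuelB (buildAdjB syn)) [s] PySem.Set.empty) (fun x => x)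
              then some (PySem.List.sorted (bfsB (buildAdjB syn) (fuelB (buildAdjB syn)) [s] PySem.Set.empty) (fun x => x))
              else d.get? w := fun w => get?_foldl_insert_const _ _ d w
        have inv1 : ∀ w, ((PySem.List.sorted (bfsB (buildAdjB syn) (fuelB (buildAdjB syn)) [s] PySem.Set.empty) (fun x => x)).foldl
            (fun c u => c.insert u (PySem.List.sorted (bfsB (buildAdjB syn) (fuelB (buildAdjB syn)) [s] PySem.Set.empty) (fun x => x))) d).contains w = true
            → w ∈ (buildAdjB syn).keys := by
          intro w hw
          rcases (hcont1 w).mp hw with h | h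
          · exact hd1 w h
          · exact hreach hskeys ((hcmem w).mp h)
        have inv2 : ∀ w v, ((PySem.List.sorted (bfsB (buildAdjB syn) (fuelB (buildAdjB syn)) [s] PySem.Set.empty) (fun x => x)).foldl
            (fun c u => c.insert u (PySem.List.sorted (bfsB (buildAdjB syn) (fuelB (buildAdjB syn)) [s] PySem.Set.empty) (fun x => x))) d).get? w = some v
            → ∃ c, c.Nodup ∧ (∀ x, x ∈ c ↔ Reach syn w x) ∧ v = PySem.List.sorted c (fun x => x) := by
          intro w v hv
          rw [hget1 w] at hv
          by_cases hwc : w ∈ PySem.List.sorted (bfsB (buildAdjB syn) (fuelB (buildAdjB syn)) [s] PySem.Set.empty) (fun x => x)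
          · rw [if_pos hwc] at hv
            cases hv
            have hsw : Reach syn s w := (hcmem w).mp ((hmm w).mp hwc)
            refine ⟨bfsB (buildAdjB syn) (fuelB (buildAdjB syn)) [s] PySem.Set.empty, hcnd, fun x => (hcmem x).trans ?_, rfl⟩
            exact ⟨fun h => Relation.ReflTransGen.trans (reach_symm hsw) h,
                   fun h => Relation.ReflTransGen.trans hsw h⟩
          · rw [if_neg hwc] at hv
            exact hd2 w v hv
        obtain ⟨p1, p2, p3, p4⟩ := ihl (fun x hx => hl x (by simp [hx])) _ inv1 inv2
        refine ⟨p1, p2, fun w hw => p3 w ((hcont1 w).mpr (Or.inl hw)), ?_⟩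
        intro x hx
        rcases List.mem_cons.mp hx with rfl | hx2
        · exact p3 x ((hcont1 x).mpr (Or.inr ((hcmem x).mpr Relation.ReflTransGen.refl)))
        · exact p4 x hx2
  obtain ⟨p1, p2, _, p4⟩ := fold (buildAdjB syn).keys (fun x hx => hx) PySem.Dict.empty
    (by intro w h; rw [PySem.Dict.contains_empty] at h; cases h)
    (by intro w v h; rw [PySem.Dict.get?_empty] at h; cases h)
  exact ⟨fun w => ⟨p1 w, p4 w⟩, p2⟩

theorem choose_eq {syn} (hpre : ∀ p ∈ syn, p.length = 2) (w : String) :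
    (if (buildSynsetsA (buildGraphA syn)).contains w = true then
       PySem.List.sorted ((buildSynsetsA (buildGraphA syn)).getD w PySem.Set.empty) (fun x => x)
     else [w])
    = ((buildClassesB (buildAdjB syn)).get? w).getD [w] := by
  obtain ⟨a1, a2⟩ := synsetsA_spec hpre
  obtain ⟨b1, b2⟩ := classesB_spec hpre
  by_cases hw : ∃ p ∈ syn, w ∈ p
  · have hwa : (buildSynsetsA (buildGraphA syn)).contains w = true :=
      (a1 w).mpr ((graphA_mem_keys hpre w).mpr hw)
    have hwb : (buildClassesB (buildAdjB syn)).contains w = true :=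
      (b1 w).mpr ((adjB_mem_keys hpre w).mpr hw)
    rw [if_pos hwa]
    obtain ⟨vA, hvA⟩ : ∃ vA, (buildSynsetsA (buildGraphA syn)).get? w = some vA := by
      cases h : (buildSynsetsA (buildGraphA syn)).get? w with
      | none => rw [(PySem.Dict.get?_eq_none_iff_contains _ _).mp h] at hwa; cases hwa
      | some v => exact ⟨v, rfl⟩
    obtain ⟨vB, hvB⟩ : ∃ vB, (buildClassesB (buildAdjB syn)).get? w = some vB := by
      cases h : (buildClassesB (buildAdjB syn)).get? w with
      | none => rw [(PySem.Dict.get?_eq_none_iff_contains _ _).mp h] at hwb; cases hwb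
      | some v => exact ⟨v, rfl⟩
    obtain ⟨hAnd, hAmem⟩ := a2 w vA hvA
    obtain ⟨c, hcnd, hcmem, hceq⟩ := b2 w vB hvB
    rw [PySem.Dict.getD_eq_get?_getD, hvA, hvB]
    simp only [Option.getD_some]
    rw [hceq]
    have hperm : (PySem.List.sorted vA (fun x : String => x)).Perm (PySem.List.sorted c (fun x : String => x)) := by
      refine ((PySem.List.sorted_perm vA (fun x => x) false).trans ?_).trans
        (PySem.List.sorted_perm c (fun x => x) false).symm
      rw [List.perm_ext_iff_of_nodup hAnd hcnd]
      intro a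
      rw [hAmem a, hcmem a]
    exact PySem.List.eq_of_perm_of_pairwise_le_of_injective (fun x : String => x)
      (fun _ _ h => h) hperm (PySem.List.sorted_pairwise _ _) (PySem.List.sorted_pairwise _ _)
  · have hwa : ¬ (buildSynsetsA (buildGraphA syn)).contains w = true :=
      fun h => hw ((graphA_mem_keys hpre w).mp ((a1 w).mp h))
    have hwb : (buildClassesB (buildAdjB syn)).contains w = false := by
      cases h : (buildClassesB (buildAdjB syn)).contains w with
      | false => rfl
      | true => exact absurd ((adjB_mem_keys hpre w).mp ((b1 w).mp h)) hw
    rw [if_neg hwa, (PySem.Dict.get?_eq_none_iff_contains _ _).mpr hwb]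
    rfl

-- ---------- sentence generation ----------

theorem join_ext (o : String) (t : List String) : PySem.Str.join " " (o :: t) = o ++ extS t := by
  induction t generalizing o with
  | nil =>
    apply String.ext
    rw [PySem.Str.toList_join]
    simp [PySem.Chars.join_singleton, extS]
  | cons o2 t2 ih =>
    apply String.ext
    rw [PySem.Str.toList_join]
    simp only [List.map_cons]
    rw [PySem.Chars.join_cons_cons]
    have h2 : PySem.Chars.join " ".toList (o2.toList :: t2.map String.toList)
        = (PySem.Str.join " " (o2 :: t2)).toList := by
      rw [PySem.Str.toList_join]; simp
    rw [h2, ih o2]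
    simp [extS, String.toList_append, List.append_assoc]

theorem backA_eq (dA : PySem.Dict String (PySem.Set String)) :
    ∀ (ws path res : List String),
      backA dA ws path res
      = res ++ (prodL (ws.map (fun w =>
          if dA.contains w = true then PySem.List.sorted (dA.getD w PySem.Set.empty) (fun x => x)
          else [w]))).map (fun t => PySem.Str.join " " (path ++ t)) := by
  intro ws
  induction ws with
  | nil => intro path res; simp [backA, prodL]
  | cons w rest ih =>
    intro path res
    simp only [backA, List.map_cons]
    cases hB : dA.contains w with
    | true =>
      rw [if_pos rfl, if_pos rfl]
      rw [PySem.List.foldl_congr_mem _ _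
        (fun acc syn => acc ++ (prodL (rest.map (fun w =>
          if dA.contains w = true then PySem.List.sorted (dA.getD w PySem.Set.empty) (fun x => x)
          else [w]))).map (fun t => PySem.Str.join " " ((path ++ [syn]) ++ t))) res
        (by intro acc x _; exact ih (path ++ [x]) acc)]
      rw [PySem.List.foldl_append_eq_flatMap]
      simp only [prodL, List.map_flatMap, List.map_map]
      have hp : ∀ (x : String) (t : List String), (path ++ [x]) ++ t = path ++ (x :: t) := by
        intro x t; simp
      simp [hp, Function.comp_def]
    | false =>
      simp only [if_neg Bool.false_ne_true]
      rw [ih (path ++ [w]) res]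
      simp only [prodL, List.flatMap_cons, List.flatMap_nil, List.append_nil, List.map_map]
      have hp : ∀ (t : List String), (path ++ [w]) ++ t = path ++ (w :: t) := by
        intro t; simp
      simp [hp, Function.comp_def]

theorem foldB_eq (cl : PySem.Dict String (List String)) :
    ∀ (ws : List String) (n : Int), 1 ≤ n → ∀ (S : List String),
      (PySem.List.enumerate ws n).foldl
        (fun sentences iw =>
          let opts := (cl.get? iw.2).getD [iw.2]
          let sep := if iw.1 = 0 then "" else " "
          sentences.flatMap (fun s => opts.map (fun o => s ++ sep ++ o))) S
      = S.flatMap (fun s => (prodL (ws.map (fun w => (cl.get? w).getD [w]))).map (fun t => s ++ extS t)) := by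
  intro ws
  induction ws with
  | nil =>
    intro n _ S
    simp [PySem.List.enumerate, prodL, extS, String.append_empty]
  | cons w rest ih =>
    intro n hn S
    rw [PySem.List.enumerate_cons, List.foldl_cons]
    have hn0 : ¬ ((n, w).1 = 0) := by simp; omega
    rw [ih (n + 1) (by omega)]
    simp only [if_neg hn0]
    simp only [prodL, List.map_cons, List.flatMap_assoc, List.flatMap_map, List.map_flatMap,
      List.map_map, Function.comp_def]
    simp [String.append_assoc, extS]

theorem altFold_eq (cl : PySem.Dict String (List String)) (ws : List String) :
    (PySem.List.enumerate ws).foldl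
      (fun sentences iw =>
        let opts := (cl.get? iw.2).getD [iw.2]
        let sep := if iw.1 = 0 then "" else " "
        sentences.flatMap (fun s => opts.map (fun o => s ++ sep ++ o))) [""]
    = (prodL (ws.map (fun w => (cl.get? w).getD [w]))).map (fun t => PySem.Str.join " " t) := by
  cases ws with
  | nil =>
    simp [PySem.List.enumerate, prodL]
    rfl
  | cons w rest =>
    rw [PySem.List.enumerate_cons, List.foldl_cons]
    rw [foldB_eq cl rest (0 + 1) (by omega)]
    simp only [prodL, List.map_cons, List.flatMap_assoc, List.flatMap_map, List.map_flatMap,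
      List.map_map, Function.comp_def]
    have h2 : ∀ (o : String) (t : List String), PySem.Str.join " " (o :: t) = o ++ extS t := join_ext
    simp [h2]

-- ===== VERDICT (by name: the statement is the Claim_ definition above) =====
theorem generateSentences_spec : Claim_equal_generateSentences := by
  intro synonyms text _hdom hpre
  unfold Spec_generateSentences
  simp only [generateSentences, generateSentences_alt]
  rw [backA_eq, altFold_eq]
  simp only [List.nil_append]
  have hch : (PySem.Str.split₀ text).map (fun w =>
      if (buildSynsetsA (buildGraphA synonyms)).contains w = true then
        PySem.List.sorted ((buildSynsetsA (buildGraphA synonyms)).getD w PySem.Set.empty) (fun x => x)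
      else [w])
    = (PySem.Str.split₀ text).map (fun w => ((buildClassesB (buildAdjB synonyms)).get? w).getD [w]) :=
    List.map_congr_left (fun w _ => choose_eq hpre w)
  rw [hch]
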